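-- pv_equiv track=rewrite | github.com/freeipa/freeipa | ipalib/docformat.py | linkify_md
-- ===== SOURCE A (Python) =====
-- def linkify_md(text, xref_commands):
--     """Wrap known hyphenated IPA command names in Markdown links.
--
--     Only hyphenated words (e.g. ``user-add``) are considered.
--     Single-word topic names are skipped to avoid false positives.
--     """
--     result = []
--     word = []
--     for ch in text:
--         if ch.islower() or ch.isdigit() or ch == '-':
--             word.append(ch)
--         else:
--             result.append(_flush_word_md(''.join(word), xref_commands))
--             word = []
--             result.append(ch)
--     result.append(_flush_word_md(''.join(word), xref_commands))
--     return ''.join(result)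
--
-- def _flush_word_md(word, xref_commands):
--     if '-' in word and word in xref_commands:
--         topic = xref_commands[word]
--         return '[{w}]({t}.md#{w})'.format(w=word, t=topic)
--     return word
-- ===== SOURCE B (Python) =====
-- def linkify_md(text, xref_commands):
--     """Wrap known hyphenated IPA command names in Markdown links.
--
--     Run-scanning rewrite: instead of buffering one character at a time,
--     scan maximal runs of word characters with an index and flush each run
--     at once; non-word characters are copied through unchanged.
--     """
--     def is_word(ch):
--         return ch.islower() or ch.isdigit() or ch == '-'
--
--     pieces = []
--     i = 0
--     n = len(text)
--     while i < n:
--         if is_word(text[i]):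
--             j = i + 1
--             while j < n and is_word(text[j]):
--                 j += 1
--             pieces.append(_flush_word_md(text[i:j], xref_commands))
--             i = j
--         else:
--             pieces.append(text[i])
--             i += 1
--     return ''.join(pieces)
--
-- def _flush_word_md(word, xref_commands):
--     if '-' in word and word in xref_commands:
--         topic = xref_commands[word]
--         return '[{w}]({t}.md#{w})'.format(w=word, t=topic)
--     return word
-- ===== Notes on version B (the rewrite author's own statement) =====
-- stated objective: alternative
-- what changed: B replaces A's per-character buffering (append each word char to a buffer, flush on every non-word char and at the end) with an index-based run scanner: it finds each maximal run of word characters with an inner while loop, flushes the whole run at once via slicing, and copies non-word characters through directly.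
import Mathlib
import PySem

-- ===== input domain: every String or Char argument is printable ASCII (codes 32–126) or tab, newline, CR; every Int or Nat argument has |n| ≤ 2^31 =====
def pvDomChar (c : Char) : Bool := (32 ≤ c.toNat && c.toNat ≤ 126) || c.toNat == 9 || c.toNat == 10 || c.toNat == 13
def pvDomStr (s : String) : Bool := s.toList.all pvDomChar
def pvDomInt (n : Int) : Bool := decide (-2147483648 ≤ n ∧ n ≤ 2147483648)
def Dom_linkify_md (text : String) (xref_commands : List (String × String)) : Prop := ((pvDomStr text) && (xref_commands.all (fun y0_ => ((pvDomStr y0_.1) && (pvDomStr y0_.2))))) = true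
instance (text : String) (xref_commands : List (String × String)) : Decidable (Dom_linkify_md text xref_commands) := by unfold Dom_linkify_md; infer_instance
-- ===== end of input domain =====

-- B is an alternative decomposition (run scanner instead of per-character buffer); same value everywhere.

-- ch.islower() or ch.isdigit() or ch == '-'  (shared test, used verbatim by both Pythons)
def pvIsWord (c : Char) : Bool := PySem.Chars.islower c || PySem.Chars.isdigit c || c == '-'

-- _flush_word_md(word, xref_commands): shared module-level helper of both Pythons.
-- '-' in word is single-char membership; 'word in xref_commands' / xref_commands[word]
-- is assoc-list first-match lookup (the dict convention).
def pvFlushWord (w : List Char) (xref_commands : List (String × String)) : List Char :=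
  match List.lookup (String.mk w) xref_commands with
  | some topic =>
      if w.contains '-' then
        '[' :: w ++ ']' :: '(' :: topic.toList ++ '.' :: 'm' :: 'd' :: '#' :: w ++ [')']
      else w
  | none => w

-- ===== PORT A =====
-- for ch in text: buffer word chars; on a non-word char flush the buffer and the char; flush at the end.
def linkify_md (text : String) (xref_commands : List (String × String)) : String :=
  let st := text.toList.foldl
    (fun (st : List (List Char) × List Char) ch =>
      if pvIsWord ch then (st.1, st.2 ++ [ch])
      else (st.1 ++ [pvFlushWord st.2 xref_commands, [ch]], []))
    ([], [])
  String.mk (st.1 ++ [pvFlushWord st.2 xref_commands]).flatten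

-- ===== PORT B =====
-- index scan: at a word char take the maximal run (text[i:j]) and flush it; copy other chars.
def pvScanB (xref_commands : List (String × String)) : List Char → List (List Char)
  | [] => []
  | c :: cs =>
      if pvIsWord c then
        pvFlushWord (c :: cs.takeWhile pvIsWord) xref_commands
          :: pvScanB xref_commands (cs.dropWhile pvIsWord)
      else [c] :: pvScanB xref_commands cs
termination_by cs => cs.length
decreasing_by
  · exact Nat.lt_succ_of_le (List.length_dropWhile_le pvIsWord cs)
  · simp

def linkify_md_alt (text : String) (xref_commands : List (String × String)) : String :=
  String.mk (pvScanB xref_commands text.toList).flatten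

-- ===== PRECONDITION & SPEC =====
def Spec_linkify_md (text : String) (xref_commands : List (String × String)) (out : String) : Prop := out = linkify_md_alt text xref_commands
instance (text : String) (xref_commands : List (String × String)) (out : String) : Decidable (Spec_linkify_md text xref_commands out) := by unfold Spec_linkify_md; infer_instance

-- ===== CLAIM (what is proved, stated in full; the proofs are below) =====
def Claim_equal_linkify_md : Prop := ∀ (text : String) (xref_commands : List (String × String)), Dom_linkify_md text xref_commands → Spec_linkify_md text xref_commands (linkify_md text xref_commands)

-- ===== LEMMAS AND PROOFS =====

-- reference recursion: A's loop written as structural recursion on the text with pending word w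
def pvSpecA (x : List (String × String)) (w : List Char) : List Char → List Char
  | [] => pvFlushWord w x
  | c :: cs =>
      if pvIsWord c then pvSpecA x (w ++ [c]) cs
      else pvFlushWord w x ++ c :: pvSpecA x [] cs

lemma pvFlush_nil (x : List (String × String)) : pvFlushWord [] x = [] := by
  unfold pvFlushWord
  cases h : List.lookup (String.mk []) x <;> simp

lemma pvA_eq_spec (x : List (String × String)) :
    ∀ (cs : List Char) (res : List (List Char)) (w : List Char),
      ((cs.foldl
        (fun (st : List (List Char) × List Char) ch =>
          if pvIsWord ch then (st.1, st.2 ++ [ch])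
          else (st.1 ++ [pvFlushWord st.2 x, [ch]], []))
        (res, w)).1 ++ [pvFlushWord
          (cs.foldl
            (fun (st : List (List Char) × List Char) ch =>
              if pvIsWord ch then (st.1, st.2 ++ [ch])
              else (st.1 ++ [pvFlushWord st.2 x, [ch]], []))
            (res, w)).2 x]).flatten
      = res.flatten ++ pvSpecA x w cs := by
  intro cs
  induction cs with
  | nil => intro res w; simp [pvSpecA]
  | cons c cs ih =>
      intro res w
      by_cases h : pvIsWord c
      · simp only [List.foldl_cons, h, if_pos, pvSpecA]
        rw [ih]
      · simp only [List.foldl_cons, h, pvSpecA, Bool.false_eq_true, if_false]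
        rw [ih]
        simp

lemma pvSpecA_run (x : List (String × String)) :
    ∀ (cs : List Char) (w : List Char),
      pvSpecA x w cs
        = pvFlushWord (w ++ cs.takeWhile pvIsWord) x ++ pvSpecA x [] (cs.dropWhile pvIsWord) := by
  intro cs
  induction cs with
  | nil => intro w; simp [pvSpecA, pvFlush_nil]
  | cons c cs ih =>
      intro w
      by_cases h : pvIsWord c
      · simp only [pvSpecA, h, if_pos, List.takeWhile_cons, List.dropWhile_cons]
        rw [ih (w ++ [c])]
        simp
      · simp only [pvSpecA, h, List.takeWhile_cons, List.dropWhile_cons,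
          Bool.false_eq_true, if_false]
        simp [pvFlush_nil]

lemma pvSpecA_eq_scanB (x : List (String × String)) :
    ∀ (cs : List Char), pvSpecA x [] cs = (pvScanB x cs).flatten := by
  intro cs
  induction hn : cs.length using Nat.strong_induction_on generalizing cs with
  | _ n ih =>
    cases cs with
    | nil => simp [pvSpecA, pvScanB, pvFlush_nil]
    | cons c cs =>
        by_cases h : pvIsWord c
        · rw [pvSpecA_run x (c :: cs) []]
          simp only [List.takeWhile_cons, List.dropWhile_cons, h, if_pos, List.nil_append]
          have hlt : (cs.dropWhile pvIsWord).length < n := by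
            have := List.length_dropWhile_le pvIsWord cs
            simp only [← hn, List.length_cons]; omega
          rw [ih ((cs.dropWhile pvIsWord).length) hlt (cs.dropWhile pvIsWord) rfl]
          simp [pvScanB, h]
        · simp only [pvSpecA, h, Bool.false_eq_true, if_false, pvFlush_nil, List.nil_append]
          have hlt : cs.length < n := by simp only [← hn, List.length_cons]; omega
          rw [ih cs.length hlt cs rfl]
          simp [pvScanB, h]

theorem pv_main (text : String) (x : List (String × String)) :
    linkify_md text x = linkify_md_alt text x := by
  show String.mk
      (((text.toList.foldl
          (fun (st : List (List Char) × List Char) ch =>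
            if pvIsWord ch then (st.1, st.2 ++ [ch])
            else (st.1 ++ [pvFlushWord st.2 x, [ch]], []))
          ([], [])).1 ++ [pvFlushWord
            (text.toList.foldl
              (fun (st : List (List Char) × List Char) ch =>
                if pvIsWord ch then (st.1, st.2 ++ [ch])
                else (st.1 ++ [pvFlushWord st.2 x, [ch]], []))
              ([], [])).2 x]).flatten)
      = String.mk (pvScanB x text.toList).flatten
  rw [pvA_eq_spec x text.toList [] []]
  rw [pvSpecA_eq_scanB x text.toList]
  simp

-- ===== VERDICT (by name: the statement is the Claim_ definition above) =====
theorem linkify_md_spec : Claim_equal_linkify_md := by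
  intro text x _
  unfold Spec_linkify_md
  exact pv_main text x
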